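-- pv_equiv track=rewrite | github.com/dianaract1311/ep2_26 | funcoes.py | calcula_pontos_sequencia_baixa
-- ===== SOURCE A (Python) =====
-- def calcula_pontos_sequencia_baixa(dados): ## question 6
--     # tirar repetidos
--     valores = []
--     i = 0
--     while i < len(dados):
--         if dados[i] not in valores:
--             valores.append(dados[i])
--         i += 1
--
--     # verificar sequências
--     if (1 in valores and 2 in valores and 3 in valores and 4 in valores):
--         return 15
--     if (2 in valores and 3 in valores and 4 in valores and 5 in valores):
--         return 15
--     if (3 in valores and 4 in valores and 5 in valores and 6 in valores):
--         return 15
--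
--     return 0
-- ===== SOURCE B (Python) =====
-- def calcula_pontos_sequencia_baixa(dados):
--     run = 0
--     for v in range(1, 7):
--         run = run + 1 if v in dados else 0
--         if run >= 4:
--             return 15
--     return 0
-- ===== Notes on version B (the rewrite author's own statement) =====
-- stated objective: simpler
-- what changed: Instead of building a dedup list and testing three hard-coded four-element windows, B makes one pass over the face values 1..6 keeping a run length of consecutive values present, returning 15 as soon as the run reaches 4.
import Mathlib
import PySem

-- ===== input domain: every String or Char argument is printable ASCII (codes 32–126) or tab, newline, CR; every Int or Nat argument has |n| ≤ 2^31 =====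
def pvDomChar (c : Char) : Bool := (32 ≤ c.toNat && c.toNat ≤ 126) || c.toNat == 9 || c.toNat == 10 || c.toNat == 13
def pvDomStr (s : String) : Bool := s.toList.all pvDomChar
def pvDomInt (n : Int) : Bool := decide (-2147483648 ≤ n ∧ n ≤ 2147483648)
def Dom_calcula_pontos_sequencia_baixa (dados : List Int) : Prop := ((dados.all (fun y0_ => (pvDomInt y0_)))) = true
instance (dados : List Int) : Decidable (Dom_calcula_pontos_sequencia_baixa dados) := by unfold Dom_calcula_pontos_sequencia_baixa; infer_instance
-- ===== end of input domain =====

-- B replaces A's dedup-then-three-window-checks with a single run-length scan over the faces 1..6; objective: simpler.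

-- ===== PORT A =====
-- while loop building `valores` (dedup in first-seen order), index i runs over dados
def pvValores : List Int → List Int → List Int
  | [], acc => acc
  | d :: ds, acc => pvValores ds (if acc.contains d then acc else acc ++ [d])

def calcula_pontos_sequencia_baixa (dados : List Int) : Int :=
  let valores := pvValores dados []
  if valores.contains 1 && valores.contains 2 && valores.contains 3 && valores.contains 4 then 15
  else if valores.contains 2 && valores.contains 3 && valores.contains 4 && valores.contains 5 then 15
  else if valores.contains 3 && valores.contains 4 && valores.contains 5 && valores.contains 6 then 15
  else 0

-- ===== PORT B =====
-- for v in range(1,7): run = run+1 if v in dados else 0; early return 15 when run >= 4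
def pvRunLoop (dados : List Int) : List Int → Int → Int
  | [], _ => 0
  | v :: vs, run =>
    let run' := if dados.contains v then run + 1 else 0
    if run' ≥ 4 then 15 else pvRunLoop dados vs run'

def calcula_pontos_sequencia_baixa_alt (dados : List Int) : Int :=
  pvRunLoop dados [1, 2, 3, 4, 5, 6] 0

-- ===== PRECONDITION & SPEC =====
def Spec_calcula_pontos_sequencia_baixa (dados : List Int) (out : Int) : Prop := out = calcula_pontos_sequencia_baixa_alt dados
instance (dados : List Int) (out : Int) : Decidable (Spec_calcula_pontos_sequencia_baixa dados out) := by unfold Spec_calcula_pontos_sequencia_baixa; infer_instance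

-- ===== CLAIM (what is proved, stated in full; the proofs are below) =====
def Claim_equal_calcula_pontos_sequencia_baixa : Prop := ∀ (dados : List Int), Dom_calcula_pontos_sequencia_baixa dados → Spec_calcula_pontos_sequencia_baixa dados (calcula_pontos_sequencia_baixa dados)

-- ===== LEMMAS AND PROOFS =====

-- A's result as a function of the six membership booleans
def pvA (b1 b2 b3 b4 b5 b6 : Bool) : Int :=
  if b1 && b2 && b3 && b4 then 15
  else if b2 && b3 && b4 && b5 then 15
  else if b3 && b4 && b5 && b6 then 15
  else 0

-- B's result as a function of the six membership booleans
def pvB (b1 b2 b3 b4 b5 b6 : Bool) : Int :=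
  let r1 := if b1 then 1 else 0
  let r2 := if b2 then r1 + 1 else 0
  let r3 := if b3 then r2 + 1 else 0
  let r4 := if b4 then r3 + 1 else 0
  if r4 ≥ 4 then 15 else
  let r5 := if b5 then r4 + 1 else 0
  if r5 ≥ 4 then 15 else
  let r6 := if b6 then r5 + 1 else 0
  if r6 ≥ 4 then 15 else 0

theorem mem_pvValores (ds acc : List Int) (x : Int) :
    x ∈ pvValores ds acc ↔ x ∈ acc ∨ x ∈ ds := by
  induction ds generalizing acc with
  | nil => simp [pvValores]
  | cons d ds ih =>
    by_cases h : acc.contains d = true <;> simp_all [pvValores, ih]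
    · constructor
      · tauto
      · rintro (hx | rfl | hx) <;> tauto
    · tauto

theorem A_eq_pvA (dados : List Int) :
    calcula_pontos_sequencia_baixa dados =
      pvA (decide ((1:Int) ∈ dados)) (decide ((2:Int) ∈ dados)) (decide ((3:Int) ∈ dados))
          (decide ((4:Int) ∈ dados)) (decide ((5:Int) ∈ dados)) (decide ((6:Int) ∈ dados)) := by
  simp [calcula_pontos_sequencia_baixa, pvA, mem_pvValores]

theorem B_eq_pvB (dados : List Int) :
    calcula_pontos_sequencia_baixa_alt dados =
      pvB (decide ((1:Int) ∈ dados)) (decide ((2:Int) ∈ dados)) (decide ((3:Int) ∈ dados))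
          (decide ((4:Int) ∈ dados)) (decide ((5:Int) ∈ dados)) (decide ((6:Int) ∈ dados)) := by
  by_cases h1 : (1:Int) ∈ dados <;> by_cases h2 : (2:Int) ∈ dados <;>
  by_cases h3 : (3:Int) ∈ dados <;> by_cases h4 : (4:Int) ∈ dados <;>
  by_cases h5 : (5:Int) ∈ dados <;> by_cases h6 : (6:Int) ∈ dados <;>
    simp [calcula_pontos_sequencia_baixa_alt, pvRunLoop, pvB, h1, h2, h3, h4, h5, h6]

theorem pvA_eq_pvB : ∀ b1 b2 b3 b4 b5 b6 : Bool, pvA b1 b2 b3 b4 b5 b6 = pvB b1 b2 b3 b4 b5 b6 := by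
  decide

-- ===== VERDICT (by name: the statement is the Claim_ definition above) =====
theorem calcula_pontos_sequencia_baixa_spec : Claim_equal_calcula_pontos_sequencia_baixa := by
  intro dados _
  unfold Spec_calcula_pontos_sequencia_baixa
  rw [A_eq_pvA, B_eq_pvB, pvA_eq_pvB]
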